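-- pv_equiv track=rewrite | github.com/ryancinsight/CFDrs | fix_global.py | fix_duplicate_fp
-- ===== SOURCE A (Python) =====
-- def fix_duplicate_fp(content):
--     """Remove duplicate FromPrimitive imports."""
--     lines = content.split('\n')
--     # Find all FromPrimitive import lines
--     fp_lines = [i for i, l in enumerate(lines) if 'FromPrimitive' in l and l.strip().startswith('use')]
--     if len(fp_lines) >= 2:
--         # Keep first, remove rest but only if they are just "use num_traits::FromPrimitive;"
--         for idx in reversed(fp_lines[1:]):
--             if lines[idx].strip() == 'use num_traits::FromPrimitive;':
--                 lines.pop(idx)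
--     return '\n'.join(lines)
-- ===== SOURCE B (Python) =====
-- def fix_duplicate_fp(content):
--     """Remove duplicate FromPrimitive imports."""
--     out = []
--     seen = False
--     for l in content.split('\n'):
--         is_fp = 'FromPrimitive' in l and l.strip().startswith('use')
--         if is_fp and seen and l.strip() == 'use num_traits::FromPrimitive;':
--             continue
--         out.append(l)
--         seen = seen or is_fp
--     return '\n'.join(out)
-- ===== Notes on version B (the rewrite author's own statement) =====
-- stated objective: simpler
-- what changed: Replaces the index-comprehension plus reversed in-place pop loop with a single forward pass that keeps a boolean flag for having passed a FromPrimitive import and builds the output list directly.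
import Mathlib
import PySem

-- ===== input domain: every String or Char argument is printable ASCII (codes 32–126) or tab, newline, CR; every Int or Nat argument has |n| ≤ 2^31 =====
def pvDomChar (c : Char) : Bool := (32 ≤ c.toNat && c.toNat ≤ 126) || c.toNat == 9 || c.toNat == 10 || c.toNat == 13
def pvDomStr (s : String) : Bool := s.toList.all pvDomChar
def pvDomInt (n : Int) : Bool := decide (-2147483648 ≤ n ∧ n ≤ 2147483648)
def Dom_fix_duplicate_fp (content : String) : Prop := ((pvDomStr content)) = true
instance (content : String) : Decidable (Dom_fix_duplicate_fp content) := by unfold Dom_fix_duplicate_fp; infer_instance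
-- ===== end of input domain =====

set_option maxHeartbeats 1000000


-- B replaces A's index-comprehension + reversed in-place pop loop by one forward pass with a boolean flag (same result, simpler).

-- ===== PORT A =====
-- 'FromPrimitive' in l and l.strip().startswith('use')
def isFpImport (l : String) : Bool :=
  PySem.Str.isIn "FromPrimitive" l && PySem.Str.startswith (PySem.Str.strip l) "use"

-- the body of A's 'for idx in reversed(fp_lines[1:])' loop (lines[idx] / lines.pop(idx))
def fpStep (ls : List String) (idx : Int) : List String :=
  if PySem.Str.strip (PySem.List.pyGetD ls idx "") == "use num_traits::FromPrimitive;" then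
    match PySem.List.pop? ls idx with
    | some r => r.2
    | none => ls
  else ls

def fix_duplicate_fp (content : String) : String :=
  let lines := (PySem.Str.split? content "\n").getD []
  let fp_lines := ((PySem.List.enumerate lines 0).filter (fun p => isFpImport p.2)).map (·.1)
  let lines' :=
    if 2 ≤ fp_lines.length then
      ((fp_lines.drop 1).reverse).foldl fpStep lines
    else lines
  PySem.Str.join "\n" lines'

-- ===== PORT B =====
-- forward pass over the lines with a flag recording that a FromPrimitive import was passed
def fpGo (seen : Bool) (ls : List String) : List String :=
  match ls with
  | [] => []
  | l :: rest =>
    let isfp := PySem.Str.isIn "FromPrimitive" l && PySem.Str.startswith (PySem.Str.strip l) "use"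
    if isfp && seen && (PySem.Str.strip l == "use num_traits::FromPrimitive;") then
      fpGo seen rest
    else
      l :: fpGo (seen || isfp) rest

def fix_duplicate_fp_alt (content : String) : String :=
  PySem.Str.join "\n" (fpGo false ((PySem.Str.split? content "\n").getD []))

-- ===== PRECONDITION & SPEC =====
def Spec_fix_duplicate_fp (content : String) (out : String) : Prop := out = fix_duplicate_fp_alt content
instance (content : String) (out : String) : Decidable (Spec_fix_duplicate_fp content out) := by unfold Spec_fix_duplicate_fp; infer_instance

-- ===== CLAIM (what is proved, stated in full; the proofs are below) =====
def Claim_equal_fix_duplicate_fp : Prop := ∀ (content : String), Dom_fix_duplicate_fp content → Spec_fix_duplicate_fp content (fix_duplicate_fp content)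

-- ===== LEMMAS AND PROOFS =====

-- indices (as Nats) of the FromPrimitive import lines
def fpIdxs : List String → List Nat
  | [] => []
  | l :: ls => (if isFpImport l then [0] else []) ++ (fpIdxs ls).map (· + 1)

-- A's pop loop, as a foldr over ascending Nat indices (largest index processed first)
def erAll (idxs : List Nat) (ls : List String) : List String :=
  idxs.foldr (fun (n : Nat) (acc : List String) => fpStep acc (n : Int)) ls

lemma erAll_nil (ls : List String) : erAll [] ls = ls := rfl

lemma erAll_cons (n : Nat) (rest : List Nat) (ls : List String) :
    erAll (n :: rest) ls = fpStep (erAll rest ls) (n : Int) := by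
  unfold erAll
  rw [List.foldr_cons]

lemma fpIdxs_lt : ∀ (ls : List String), ∀ i ∈ fpIdxs ls, i < ls.length := by
  intro ls
  induction ls with
  | nil => simp [fpIdxs]
  | cons l t ih =>
    intro i hi
    simp only [fpIdxs, List.mem_append, List.mem_map] at hi
    rcases hi with h | ⟨j, hj, rfl⟩
    · split at h <;> simp_all
    · have := ih j hj; simp; omega

lemma fpIdxs_pairwise : ∀ (ls : List String), (fpIdxs ls).Pairwise (· < ·) := by
  intro ls
  induction ls with
  | nil => simp [fpIdxs]
  | cons l t ih =>
    have hmap : ((fpIdxs t).map (· + 1)).Pairwise (· < ·) :=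
      (List.pairwise_map).2 (ih.imp (by omega))
    by_cases hfp : isFpImport l = true
    · simp only [fpIdxs, hfp, if_true, List.singleton_append]
      refine List.pairwise_cons.2 ⟨?_, hmap⟩
      intro i hi
      rcases List.mem_map.1 hi with ⟨a, _, rfl⟩
      omega
    · simpa [fpIdxs, hfp] using hmap

lemma asc_bound : ∀ (idxs : List Nat) (n L : Nat), idxs.Pairwise (· < ·) →
    (∀ i ∈ idxs, i < L) → (∀ i ∈ idxs, n < i) → n < L → n + idxs.length < L := by
  intro idxs
  induction idxs with
  | nil => intro n L _ _ _ h; simpa using h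
  | cons r rest ih =>
    intro n L hp hL hn h0
    have h1 : r + rest.length < L :=
      ih r L hp.tail (fun i hi => hL i (List.mem_cons_of_mem _ hi))
        (fun i hi => (List.pairwise_cons.1 hp).1 i hi) (hL r (List.mem_cons_self ..))
    have : n < r := hn r (List.mem_cons_self ..)
    simp only [List.length_cons]
    omega

lemma fpStep_len (Y : List String) (i : Int) :
    Y.length ≤ (fpStep Y i).length + 1 ∧ (fpStep Y i).length ≤ Y.length := by
  unfold fpStep
  split
  · cases h : PySem.List.pop? Y i with
    | none => simp
    | some r =>
      have := PySem.List.length_of_pop?_eq_some Y h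
      simp
      omega
  · simp

lemma erAll_len : ∀ (idxs : List Nat) (ls : List String),
    ls.length ≤ (erAll idxs ls).length + idxs.length ∧ (erAll idxs ls).length ≤ ls.length := by
  intro idxs
  induction idxs with
  | nil => intro ls; simp [erAll_nil]
  | cons n rest ih =>
    intro ls
    have h1 := ih ls
    have h2 := fpStep_len (erAll rest ls) (n : Int)
    rw [erAll_cons]
    simp only [List.length_cons]
    omega

lemma fpStep_cons_succ (l : String) (X : List String) (n : Nat) (h : n < X.length) :
    fpStep (l :: X) ((n : Int) + 1) = l :: fpStep X (n : Int) := by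
  have hc : ((n : Int) + 1) = ((n + 1 : Nat) : Int) := by push_cast; ring
  have hlt : n + 1 < (l :: X).length := by simp; omega
  unfold fpStep
  rw [hc, PySem.List.pyGetD_natCast, PySem.List.pyGetD_natCast,
      PySem.List.pop?_natCast _ _ hlt, PySem.List.pop?_natCast _ _ h]
  simp only [List.getD_cons_succ, List.eraseIdx_cons_succ]
  split <;> rfl

lemma erAll_shift : ∀ (idxs : List Nat) (l : String) (ls : List String),
    idxs.Pairwise (· < ·) → (∀ i ∈ idxs, i < ls.length) →
    erAll (idxs.map (· + 1)) (l :: ls) = l :: erAll idxs ls := by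
  intro idxs
  induction idxs with
  | nil => intro l ls _ _; rfl
  | cons n rest ih =>
    intro l ls hp hb
    have hb' : ∀ i ∈ rest, i < ls.length := fun i hi => hb i (List.mem_cons_of_mem _ hi)
    have hlen : n < (erAll rest ls).length := by
      have h1 := (erAll_len rest ls).1
      have h2 : n + rest.length < ls.length :=
        asc_bound rest n ls.length hp.tail hb' (List.pairwise_cons.1 hp).1
          (hb n (List.mem_cons_self ..))
      omega
    rw [List.map_cons, erAll_cons, erAll_cons, ih l ls hp.tail hb']
    have hc : ((n + 1 : Nat) : Int) = ((n : Int) + 1) := by push_cast; ring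
    rw [hc, fpStep_cons_succ l _ n hlen]

lemma fpGo_cons (seen : Bool) (l : String) (rest : List String) :
    fpGo seen (l :: rest) =
      if isFpImport l && seen && (PySem.Str.strip l == "use num_traits::FromPrimitive;") then
        fpGo seen rest
      else l :: fpGo (seen || isFpImport l) rest := rfl

lemma erAll_fpIdxs : ∀ (ls : List String), erAll (fpIdxs ls) ls = fpGo true ls := by
  intro ls
  induction ls with
  | nil => rfl
  | cons l t ih =>
    by_cases hfp : isFpImport l = true
    · have hF : fpIdxs (l :: t) = 0 :: (fpIdxs t).map (· + 1) := by simp [fpIdxs, hfp]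
      rw [hF, erAll_cons, erAll_shift _ _ _ (fpIdxs_pairwise t) (fpIdxs_lt t), ih,
        fpGo_cons, hfp]
      have hg : PySem.List.pyGetD (l :: fpGo true t) ((0 : Nat) : Int) "" = l := by
        rw [PySem.List.pyGetD_natCast]; rfl
      unfold fpStep
      rw [hg]
      by_cases hex : (PySem.Str.strip l == "use num_traits::FromPrimitive;") = true
      · have hp0 : PySem.List.pop? (l :: fpGo true t) ((0 : Nat) : Int) = some (l, fpGo true t) := by
          simp [PySem.List.pop?_zero_cons]
        rw [hp0]
        simp [hex]
      · simp [hex]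
    · have hF : fpIdxs (l :: t) = (fpIdxs t).map (· + 1) := by simp [fpIdxs, hfp]
      rw [hF, erAll_shift _ _ _ (fpIdxs_pairwise t) (fpIdxs_lt t), ih, fpGo_cons]
      simp [hfp]

lemma erAll_fpIdxs_tail : ∀ (ls : List String), erAll ((fpIdxs ls).drop 1) ls = fpGo false ls := by
  intro ls
  induction ls with
  | nil => rfl
  | cons l t ih =>
    by_cases hfp : isFpImport l = true
    · have hF : (fpIdxs (l :: t)).drop 1 = (fpIdxs t).map (· + 1) := by simp [fpIdxs, hfp]
      rw [hF, erAll_shift _ _ _ (fpIdxs_pairwise t) (fpIdxs_lt t), erAll_fpIdxs, fpGo_cons]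
      simp [hfp]
    · have hF : (fpIdxs (l :: t)).drop 1 = ((fpIdxs t).drop 1).map (· + 1) := by
        simp [fpIdxs, hfp]
      have hp : ((fpIdxs t).drop 1).Pairwise (· < ·) :=
        (fpIdxs_pairwise t).sublist (List.drop_sublist 1 _)
      have hb : ∀ i ∈ (fpIdxs t).drop 1, i < t.length :=
        fun i hi => fpIdxs_lt t i (List.mem_of_mem_drop hi)
      rw [hF, erAll_shift _ _ _ hp hb, ih, fpGo_cons]
      simp [hfp]

lemma shift_map (xs : List Nat) (s : Int) :
    (xs.map (· + 1)).map (fun (n : Nat) => s + (n : Int)) = xs.map (fun (n : Nat) => (s + 1) + (n : Int)) := by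
  rw [List.map_map]
  apply List.map_congr_left
  intro n _
  simp only [Function.comp_apply]
  push_cast
  ring

lemma enum_filter_map : ∀ (ls : List String) (s : Int),
    ((PySem.List.enumerate ls s).filter (fun p => isFpImport p.2)).map (·.1)
      = (fpIdxs ls).map (fun (n : Nat) => s + (n : Int)) := by
  intro ls
  induction ls with
  | nil => intro s; rw [PySem.List.enumerate_nil]; rfl
  | cons l t ih =>
    intro s
    rw [PySem.List.enumerate_cons, List.filter_cons]
    by_cases hfp : isFpImport l = true
    · have hcond : (fun (p : Int × String) => isFpImport p.2) (s, l) = true := hfp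
      rw [if_pos hcond, List.map_cons, ih (s + 1)]
      have hF : fpIdxs (l :: t) = 0 :: (fpIdxs t).map (· + 1) := by simp [fpIdxs, hfp]
      rw [hF, List.map_cons, shift_map]
      congr 1
      simp
    · have hcond : ¬ ((fun (p : Int × String) => isFpImport p.2) (s, l) = true) := by
        simpa using hfp
      rw [if_neg hcond, ih (s + 1)]
      have hF : fpIdxs (l :: t) = (fpIdxs t).map (· + 1) := by simp [fpIdxs, hfp]
      rw [hF, shift_map]

lemma foldl_reverse_map_eq_erAll (idxs : List Nat) (ls : List String) :
    ((idxs.map (fun (n : Nat) => (n : Int))).reverse).foldl fpStep ls = erAll idxs ls := by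
  rw [List.foldl_reverse, List.foldr_map]
  rfl

lemma main_core (lines : List String) :
    PySem.Str.join "\n"
      (if 2 ≤ ((((PySem.List.enumerate lines 0).filter (fun p => isFpImport p.2)).map (·.1)).length) then
        ((((((PySem.List.enumerate lines 0).filter (fun p => isFpImport p.2)).map (·.1)).drop 1).reverse).foldl fpStep lines)
      else lines)
      = PySem.Str.join "\n" (fpGo false lines) := by
  have hfp : ((PySem.List.enumerate lines 0).filter (fun p => isFpImport p.2)).map (·.1)
      = (fpIdxs lines).map (fun (n : Nat) => (n : Int)) := by
    rw [enum_filter_map lines 0]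
    apply List.map_congr_left
    intro n _
    ring
  rw [hfp]
  congr 1
  by_cases h2 : 2 ≤ ((fpIdxs lines).map (fun (n : Nat) => (n : Int))).length
  · rw [if_pos h2, ← List.map_drop, foldl_reverse_map_eq_erAll, erAll_fpIdxs_tail]
  · rw [if_neg h2]
    have hlen : (fpIdxs lines).length ≤ 1 := by
      simp only [List.length_map] at h2
      omega
    have hdrop : (fpIdxs lines).drop 1 = [] := List.drop_eq_nil_of_le hlen
    rw [← erAll_fpIdxs_tail lines, hdrop, erAll_nil]

-- ===== VERDICT (by name: the statement is the Claim_ definition above) =====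
theorem fix_duplicate_fp_spec : Claim_equal_fix_duplicate_fp := by
  intro content _
  show fix_duplicate_fp content = fix_duplicate_fp_alt content
  exact main_core ((PySem.Str.split? content "\n").getD [])
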